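-- pv_equiv track=rewrite | github.com/devmastermind-19/PDCAssignmentMeshShiftVisualizer | python/shift_logic.py | row_shift
-- ===== SOURCE A (Python) =====
-- def row_shift(grid, shift):
--     """
--     Shifts the data in each row by 'shift' amount.
--     Node i sends data to i + shift mod sqrt(p).
--     This means the data received at pos j comes from pos (j - shift) mod sqrt(p).
--     """
--     n = len(grid)
--     new_grid = [[None for _ in range(n)] for _ in range(n)]
--
--     for r in range(n):
--         for c in range(n):
--             src_c = (c - shift) % n
--             new_grid[r][c] = {
--                 'id': grid[r][c]['id'],
--                 'data': grid[r][src_c]['data']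
--             }
--
--     return new_grid
-- ===== SOURCE B (Python) =====
-- def row_shift(grid, shift):
--     n = len(grid)
--     if n == 0:
--         return []
--     s = shift % n
--     new_grid = []
--     for row in grid:
--         data = [cell['data'] for cell in row[:n]]
--         rotated = data[n - s:] + data[:n - s]
--         new_grid.append([{'id': row[c]['id'], 'data': rotated[c]} for c in range(n)])
--     return new_grid
-- ===== Notes on version B (the rewrite author's own statement) =====
-- stated objective: alternative
-- what changed: B materialises each row's data sequence, rotates it once by slicing (s = shift % n computed once), and zips it back with the ids, instead of A's per-cell (c - shift) % n source-index arithmetic into a preallocated n x n grid.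
import Mathlib
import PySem

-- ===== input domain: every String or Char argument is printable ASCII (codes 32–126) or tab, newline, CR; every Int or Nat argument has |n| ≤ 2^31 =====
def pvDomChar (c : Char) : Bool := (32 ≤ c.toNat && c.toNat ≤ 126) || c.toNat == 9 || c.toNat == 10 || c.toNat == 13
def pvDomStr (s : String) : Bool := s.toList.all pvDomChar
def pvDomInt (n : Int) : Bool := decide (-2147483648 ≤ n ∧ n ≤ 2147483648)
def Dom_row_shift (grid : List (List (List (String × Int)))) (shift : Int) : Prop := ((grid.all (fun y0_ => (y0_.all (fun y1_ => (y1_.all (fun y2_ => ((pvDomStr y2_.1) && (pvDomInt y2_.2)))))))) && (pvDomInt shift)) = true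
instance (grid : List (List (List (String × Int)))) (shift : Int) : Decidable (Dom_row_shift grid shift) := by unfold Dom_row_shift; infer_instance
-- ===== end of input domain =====

-- B rotates each row's data list once by slicing instead of A's per-cell modular index arithmetic (objective: alternative).

-- ===== PORT A =====
-- dicts are association lists; cell['k'] is first-match lookup (total under Pre_, which requires the keys)
def row_shift (grid : List (List (List (String × Int)))) (shift : Int) : List (List (List (String × Int))) :=
  let n := grid.length
  (PySem.List.pyRange 0 (n : Int) 1).map (fun r =>
    (PySem.List.pyRange 0 (n : Int) 1).map (fun c =>
      let src_c := PySem.Int.mod (c - shift) (n : Int)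
      [("id", (List.lookup "id" (PySem.List.pyGetD (PySem.List.pyGetD grid r []) c [])).getD 0),
       ("data", (List.lookup "data" (PySem.List.pyGetD (PySem.List.pyGetD grid r []) src_c [])).getD 0)]))

-- ===== PORT B =====
def row_shift_alt (grid : List (List (List (String × Int)))) (shift : Int) : List (List (List (String × Int))) :=
  let n := grid.length
  if n = 0 then []
  else
    let s := PySem.Int.mod shift (n : Int)
    grid.map (fun row =>
      let data := (PySem.List.slice row none (some (n : Int))).map
                    (fun cell => (List.lookup "data" cell).getD 0)
      let rotated := PySem.List.slice data (some ((n : Int) - s)) none ++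
                     PySem.List.slice data none (some ((n : Int) - s))
      (PySem.List.pyRange 0 (n : Int) 1).map (fun c =>
        [("id", (List.lookup "id" (PySem.List.pyGetD row c [])).getD 0),
         ("data", PySem.List.pyGetD rotated c 0)]))

-- ===== PRECONDITION & SPEC =====
-- Pre_ excludes exactly the inputs where Python A raises: a row shorter than the grid
-- (IndexError) or a cell among the first len(grid) of a row missing the 'id' or 'data' key (KeyError).
def Pre_row_shift (grid : List (List (List (String × Int)))) (shift : Int) : Prop :=
  ∀ row ∈ grid, grid.length ≤ row.length ∧
    ∀ cell ∈ row.take grid.length, (List.lookup "id" cell).isSome ∧ (List.lookup "data" cell).isSome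
instance (grid : List (List (List (String × Int)))) (shift : Int) : Decidable (Pre_row_shift grid shift) := by unfold Pre_row_shift; infer_instance
def pvWitness_row_shift : (List (List (List (String × Int)))) × Int :=
  ([[[("id", 1), ("data", 2)]]], 0)
def Spec_row_shift (grid : List (List (List (String × Int)))) (shift : Int) (out : List (List (List (String × Int)))) : Prop := out = row_shift_alt grid shift
instance (grid : List (List (List (String × Int)))) (shift : Int) (out : List (List (List (String × Int)))) : Decidable (Spec_row_shift grid shift out) := by unfold Spec_row_shift; infer_instance

-- ===== CLAIM (what is proved, stated in full; the proofs are below) =====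
def Claim_equal_row_shift : Prop := ∀ (grid : List (List (List (String × Int)))) (shift : Int), Dom_row_shift grid shift → Pre_row_shift grid shift → Spec_row_shift grid shift (row_shift grid shift)

-- ===== LEMMAS AND PROOFS =====

lemma rot_index (n : Nat) (hn : 0 < n) (shift c : Int) (hc0 : 0 ≤ c) (hcn : c < (n:Int)) :
    PySem.Int.mod (c - shift) (n:Int) =
      if c < PySem.Int.mod shift (n:Int) then c - PySem.Int.mod shift (n:Int) + n
      else c - PySem.Int.mod shift (n:Int) := by
  have hnpos : (0:Int) < (n:Int) := by exact_mod_cast hn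
  rw [PySem.Int.mod_eq_emod_of_pos hnpos, PySem.Int.mod_eq_emod_of_pos hnpos]
  set s := shift % (n:Int) with hs
  have hs0 : 0 ≤ s := Int.emod_nonneg _ (by omega)
  have hsn : s < (n:Int) := Int.emod_lt_of_pos _ hnpos
  have h1 : (c - shift) % (n:Int) = (c - s) % (n:Int) := by
    rw [Int.sub_emod c shift, Int.sub_emod c s, hs, Int.emod_emod_of_dvd _ dvd_rfl]
  rw [h1]
  by_cases h : c < s
  · rw [if_pos h, show (c - s) % (n:Int) = (c - s + n) % (n:Int) from (Int.add_emod_right ..).symm,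
        Int.emod_eq_of_lt (by omega) (by omega)]
  · rw [if_neg h, Int.emod_eq_of_lt (by omega) (by omega)]

-- per-row: rotated lookup equals modular lookup
lemma row_rot (n : Nat) (hn : 0 < n) (shift c : Int) (hc0 : 0 ≤ c) (hcn : c < (n:Int))
    (row : List (List (String × Int))) (hlen : n ≤ row.length) :
    (List.lookup "data" (PySem.List.pyGetD row (PySem.Int.mod (c - shift) (n:Int)) [])).getD 0 =
    PySem.List.pyGetD
      (PySem.List.slice ((PySem.List.slice row none (some (n:Int))).map (fun cell => (List.lookup "data" cell).getD 0)) (some ((n:Int) - PySem.Int.mod shift (n:Int))) none ++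
       PySem.List.slice ((PySem.List.slice row none (some (n:Int))).map (fun cell => (List.lookup "data" cell).getD 0)) none (some ((n:Int) - PySem.Int.mod shift (n:Int))))
      c 0 := by
  have hnpos : (0:Int) < (n:Int) := by exact_mod_cast hn
  set s := PySem.Int.mod shift (n:Int) with hs
  have hs0 : 0 ≤ s := by rw [hs, PySem.Int.mod_eq_emod_of_pos hnpos]; exact Int.emod_nonneg _ (by omega)
  have hsn : s < (n:Int) := by rw [hs, PySem.Int.mod_eq_emod_of_pos hnpos]; exact Int.emod_lt_of_pos _ hnpos
  set f : List (String × Int) → Int := fun cell => (List.lookup "data" cell).getD 0 with hf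
  have hdata : (PySem.List.slice row none (some (n:Int))).map f = (row.take n).map f := by
    rw [PySem.List.slice_to_natCast]
  have hdlen : ((row.take n).map f).length = n := by simp [hlen]
  have hrot : PySem.List.slice ((row.take n).map f) (some ((n:Int) - s)) none ++
       PySem.List.slice ((row.take n).map f) none (some ((n:Int) - s))
      = ((row.take n).map f).drop ((n:Int) - s).toNat ++ ((row.take n).map f).take ((n:Int) - s).toNat := by
    rw [PySem.List.slice_from _ (by omega), PySem.List.slice_to _ (by omega)]
  rw [hdata, hrot]
  have hi := rot_index n hn shift c hc0 hcn
  set i := PySem.Int.mod (c - shift) (n:Int) with hidef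
  have hi0 : 0 ≤ i := by rw [hidef, PySem.Int.mod_eq_emod_of_pos hnpos]; exact Int.emod_nonneg _ (by omega)
  have hin : i < (n:Int) := by rw [hidef, PySem.Int.mod_eq_emod_of_pos hnpos]; exact Int.emod_lt_of_pos _ hnpos
  rw [PySem.List.pyGetD_eq_getElem row _ hi0 (by exact_mod_cast (by omega : i < (row.length:Int)))]
  rw [PySem.List.pyGetD_eq_getElem _ _ hc0 (by simp [hlen]; omega)]
  rw [List.getElem_append]
  by_cases h : c < s
  · have hlt : c.toNat < (((row.take n).map f).drop ((n:Int) - s).toNat).length := by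
      simp [hlen]; omega
    rw [dif_pos hlt, List.getElem_drop]
    have hi' : i = c - s + (n:Int) := by rw [hi, if_pos h]
    simp only [List.getElem_map, List.getElem_take]
    have hidx : ((n:Int) - s).toNat + c.toNat = i.toNat := by omega
    simp only [hidx]
    rfl
  · have hge : ¬ c.toNat < (((row.take n).map f).drop ((n:Int) - s).toNat).length := by
      simp [hlen]; omega
    rw [dif_neg hge]
    have hi' : i = c - s := by rw [hi, if_neg h]
    simp only [List.getElem_take, List.getElem_map]
    have hidx : c.toNat - (List.drop ((n:Int) - s).toNat (List.map f (List.take n row))).length = i.toNat := by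
      simp [hlen]; omega
    simp only [hidx]
    rfl
lemma outer_map {α : Type} (G : List (List (String × Int)) → α) (grid : List (List (List (String × Int)))) :
    (PySem.List.pyRange 0 (grid.length:Int) 1).map (fun r => G (PySem.List.pyGetD grid r [])) = grid.map G := by
  conv_rhs => rw [← PySem.List.map_pyGetD_pyRange_zero' grid ([] : List (List (String × Int)))]
  rw [List.map_map]
  rfl

lemma row_shift_rows (grid : List (List (List (String × Int)))) (shift : Int)
    (hpre : ∀ row ∈ grid, grid.length ≤ row.length) :
    row_shift grid shift = row_shift_alt grid shift := by
  unfold row_shift row_shift_alt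
  dsimp only
  by_cases hz : grid.length = 0
  · rw [if_pos hz, hz]
    rw [List.eq_nil_of_length_eq_zero hz,
        show PySem.List.pyRange 0 ((0:Nat):Int) 1 = [] from by decide]
    rfl
  · rw [if_neg hz]
    set n := grid.length with hn
    refine (outer_map (fun row =>
      (PySem.List.pyRange 0 (n:Int) 1).map (fun c =>
        [("id", (List.lookup "id" (PySem.List.pyGetD row c [])).getD 0),
         ("data", (List.lookup "data" (PySem.List.pyGetD row (PySem.Int.mod (c - shift) (n:Int)) [])).getD 0)]))
      grid).trans ?_
    apply List.map_congr_left
    intro row hrow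
    apply List.map_congr_left
    intro c hc
    have hb := PySem.List.mem_pyRange_one.mp hc
    rw [row_rot n (by omega) shift c hb.1 hb.2 row (hpre row hrow)]

-- ===== VERDICT (by name: the statement is the Claim_ definition above) =====
theorem row_shift_spec : Claim_equal_row_shift := by
  intro grid shift _hdom hpre
  exact row_shift_rows grid shift (fun row hr => (hpre row hr).1)
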